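-- pv_equiv track=rewrite | github.com/ovitrac/RAGIX | ragix_core/shared/text_utils.py | normalize_for_search
-- ===== SOURCE A (Python) =====
-- import unicodedata
--
-- def normalize_for_search(text: str) -> str:
--     """
--     Normalize text for keyword matching: lowercase + whitespace normalization.
--
--     Collapses all whitespace (including newlines) to single ASCII space.
--     """
--     normalized = []
--     for ch in text:
--         if unicodedata.category(ch).startswith("Z") or ch in ("\t", "\n", "\r"):
--             normalized.append(" ")
--         else:
--             normalized.append(ch)
--     return " ".join("".join(normalized).lower().split())
-- ===== SOURCE B (Python) =====
-- def normalize_for_search(text: str) -> str: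
--     """
--     Normalize text for keyword matching: lowercase + whitespace normalization.
--
--     Collapses all whitespace (including newlines) to single ASCII space.
--     """
--     # Every whitespace character is a separator for no-arg split(), which also
--     # collapses runs, so the per-character rewrite-to-space pass is unnecessary.
--     return " ".join(text.lower().split())
-- ===== Notes on version B (the rewrite author's own statement) =====
-- stated objective: simpler
-- what changed: B drops A's per-character classify-and-rewrite loop entirely and just lowercases, splits on whitespace and rejoins, relying on no-arg split() treating every whitespace character as a separator.
import Mathlib
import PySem

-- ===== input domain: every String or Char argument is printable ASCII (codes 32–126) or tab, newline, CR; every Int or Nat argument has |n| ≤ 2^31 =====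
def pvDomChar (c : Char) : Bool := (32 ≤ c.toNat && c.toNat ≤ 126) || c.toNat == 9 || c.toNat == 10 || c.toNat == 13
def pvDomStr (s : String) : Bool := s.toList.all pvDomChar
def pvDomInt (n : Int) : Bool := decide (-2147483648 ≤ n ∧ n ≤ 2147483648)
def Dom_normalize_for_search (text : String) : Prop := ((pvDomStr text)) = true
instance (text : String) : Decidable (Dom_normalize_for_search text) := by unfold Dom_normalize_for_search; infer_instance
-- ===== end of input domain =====

-- B drops A's per-character rewrite-to-space loop: no-arg split() already treats every
-- whitespace character as a separator, so B is the one-liner " ".join(text.lower().split()).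

-- ===== PORT A =====
-- `unicodedata.category(ch).startswith("Z")` is ported by hand: on this file's input domain
-- (printable ASCII plus tab/newline/CR) the only category-Z character is ' ' (Zs), so the
-- test is exact there as `ch = ' '`.
def normalize_for_search (text : String) : String :=
  let normalized : List Char := text.toList.foldl
    (fun acc ch =>
      if ch = ' ' ∨ (ch = '\t' ∨ ch = '\n' ∨ ch = '\r')
      then acc ++ [' ']
      else acc ++ [ch]) []
  PySem.Str.join " " (PySem.Str.split₀ (PySem.Str.lower (String.ofList normalized)))

-- ===== PORT B =====
def normalize_for_search_alt (text : String) : String :=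
  PySem.Str.join " " (PySem.Str.split₀ (PySem.Str.lower text))

-- ===== PRECONDITION & SPEC =====
def Spec_normalize_for_search (text : String) (out : String) : Prop := out = normalize_for_search_alt text
instance (text : String) (out : String) : Decidable (Spec_normalize_for_search text out) := by unfold Spec_normalize_for_search; infer_instance

-- ===== CLAIM (what is proved, stated in full; the proofs are below) =====
def Claim_equal_normalize_for_search : Prop := ∀ (text : String), Dom_normalize_for_search text → Spec_normalize_for_search text (normalize_for_search text)

-- ===== LEMMAS AND PROOFS =====

-- A's whitespace-to-space rewrite of a single character
def pvRewA (ch : Char) : Char :=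
  if ch = ' ' ∨ (ch = '\t' ∨ ch = '\n' ∨ ch = '\r') then ' ' else ch

lemma pvFoldA_eq_map (cs : List Char) (a : List Char) :
    cs.foldl (fun acc ch =>
      if ch = ' ' ∨ (ch = '\t' ∨ ch = '\n' ∨ ch = '\r')
      then acc ++ [' '] else acc ++ [ch]) a = a ++ cs.map pvRewA := by
  induction cs generalizing a with
  | nil => simp
  | cons c cs ih =>
    simp only [List.foldl_cons, List.map_cons, pvRewA]
    split_ifs with h <;> simp [ih]

-- two char lists that agree on whitespace-status everywhere and on value at
-- non-whitespace positions split identically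
lemma pvGoCongr (xs ys : List Char)
    (h : List.Forall₂ (fun a b => PySem.Chars.isspace a = PySem.Chars.isspace b ∧
          (PySem.Chars.isspace a = false → a = b)) xs ys) :
    ∀ cur acc, PySem.Chars.split₀.go xs cur acc = PySem.Chars.split₀.go ys cur acc := by
  induction h with
  | nil => intro cur acc; rfl
  | @cons a b xs ys hab _ ih =>
    intro cur acc
    rcases hab with ⟨hsp, heq⟩
    by_cases hs : PySem.Chars.isspace a = true
    · have hsb : PySem.Chars.isspace b = true := by rw [← hsp]; exact hs
      simp only [PySem.Chars.split₀.go, hs, hsb, if_true]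
      split_ifs <;> exact ih _ _
    · have hb : a = b := heq (eq_false_of_ne_true hs)
      subst hb
      simp only [PySem.Chars.split₀.go]
      split_ifs
      exact ih _ _

lemma pvCharCase (c : Char) (hc : pvDomChar c = true) :
    (PySem.Chars.isspace (PySem.Chars.lowerChar (pvRewA c)) =
        PySem.Chars.isspace (PySem.Chars.lowerChar c)) ∧
    (PySem.Chars.isspace (PySem.Chars.lowerChar (pvRewA c)) = false →
        PySem.Chars.lowerChar (pvRewA c) = PySem.Chars.lowerChar c) := by
  by_cases h : c = ' ' ∨ (c = '\t' ∨ c = '\n' ∨ c = '\r')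
  · have hr : pvRewA c = ' ' := by simp [pvRewA, h]
    have hlc : PySem.Chars.lowerChar c = c := by
      rcases h with h | h | h | h <;> subst h <;> decide
    rw [hr, hlc]
    constructor
    · rcases h with h | h | h | h <;> subst h <;> decide
    · intro hf
      exfalso
      revert hf
      decide
  · have hr : pvRewA c = c := by simp [pvRewA, h]
    rw [hr]
    exact ⟨rfl, fun _ => rfl⟩

lemma pvMainChars (cs : List Char) (h : ∀ c ∈ cs, pvDomChar c = true) :
    PySem.Chars.split₀ (PySem.Chars.lower (cs.map pvRewA)) =
      PySem.Chars.split₀ (PySem.Chars.lower cs) := by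
  unfold PySem.Chars.split₀ PySem.Chars.lower
  rw [List.map_map]
  apply pvGoCongr
  rw [List.forall₂_map_right_iff, List.forall₂_map_left_iff]
  refine List.forall₂_same.mpr (fun c hc => ?_)
  exact pvCharCase c (h c hc)

-- ===== VERDICT (by name: the statement is the Claim_ definition above) =====
theorem normalize_for_search_spec : Claim_equal_normalize_for_search := by
  intro text hdom
  unfold Spec_normalize_for_search normalize_for_search normalize_for_search_alt
  have hall : ∀ c ∈ text.toList, pvDomChar c = true := by
    have := hdom
    unfold Dom_normalize_for_search pvDomStr at this
    simpa [List.all_eq_true] using this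
  simp only [pvFoldA_eq_map, List.nil_append, PySem.Str.join, PySem.Str.split₀,
    PySem.Str.lower, String.toList_ofList]
  rw [pvMainChars text.toList hall]
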